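-- pv_equiv track=rewrite | github.com/isafirmino/Ufms | Prog1/beeCrowd/lista3/fibonacciemvetor.py | calcular_fibonacci
-- ===== SOURCE A (Python) =====
-- def calcular_fibonacci(numeros):
--     x = []
--     for num in numeros:
--         if num == 0:
--             x.append(0)
--         elif num == 1:
--             x.append(1)
--         else:
--             a, b = 0, 1
--             for _ in range(num-1):
--                 a, b = b, a + b
--             x.append(b)
--     return x
-- ===== SOURCE B (Python) =====
-- def calcular_fibonacci(numeros):
--     m = max(numeros, default=1)
--     fib = [0, 1]
--     for i in range(2, m + 1):
--         fib.append(fib[i - 1] + fib[i - 2])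
--     return [0 if n == 0 else 1 if n < 2 else fib[n] for n in numeros]
-- ===== Notes on version B (the rewrite author's own statement) =====
-- stated objective: faster
-- what changed: B precomputes one Fibonacci table up to max(numeros) and answers each query by indexing it, instead of re-running an iterative Fibonacci loop for every element.
import Mathlib
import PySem

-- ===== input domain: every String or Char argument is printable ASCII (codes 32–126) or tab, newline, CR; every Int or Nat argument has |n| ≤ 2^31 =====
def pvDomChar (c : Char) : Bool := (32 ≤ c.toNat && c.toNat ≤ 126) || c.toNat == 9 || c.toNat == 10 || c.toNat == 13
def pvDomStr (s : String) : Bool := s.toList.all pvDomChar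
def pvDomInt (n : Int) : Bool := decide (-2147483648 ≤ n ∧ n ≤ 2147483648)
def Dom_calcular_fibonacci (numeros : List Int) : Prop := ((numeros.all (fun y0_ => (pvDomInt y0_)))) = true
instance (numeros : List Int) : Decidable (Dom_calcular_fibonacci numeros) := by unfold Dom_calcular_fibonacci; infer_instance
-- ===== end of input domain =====

-- B precomputes one Fibonacci table up to max(numeros) and indexes it per query, instead of A's per-element iterative loop.

-- ===== PORT A =====
def calcular_fibonacci (numeros : List Int) : List Int :=
  numeros.foldl (fun x num =>
    if num == 0 then x ++ [0]
    else if num == 1 then x ++ [1]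
    else
      let p := (PySem.List.pyRange 0 (num - 1) 1).foldl
        (fun (p : Int × Int) _ => (p.2, p.1 + p.2)) (0, 1)
      x ++ [p.2]) []

-- ===== PORT B =====
def calcular_fibonacci_alt (numeros : List Int) : List Int :=
  let m := (PySem.List.max? numeros (fun x => x)).getD 1
  let fib := (PySem.List.pyRange 2 (m + 1) 1).foldl
    (fun (fib : List Int) (i : Int) => fib ++ [PySem.List.pyGetD fib (i - 1) 0 + PySem.List.pyGetD fib (i - 2) 0])
    [0, 1]
  numeros.map (fun n => if n == 0 then 0 else if n < 2 then 1 else PySem.List.pyGetD fib n 0)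

-- ===== PRECONDITION & SPEC =====
def Spec_calcular_fibonacci (numeros : List Int) (out : List Int) : Prop := out = calcular_fibonacci_alt numeros
instance (numeros : List Int) (out : List Int) : Decidable (Spec_calcular_fibonacci numeros out) := by unfold Spec_calcular_fibonacci; infer_instance

-- ===== CLAIM (what is proved, stated in full; the proofs are below) =====
def Claim_equal_calcular_fibonacci : Prop := ∀ (numeros : List Int), Dom_calcular_fibonacci numeros → Spec_calcular_fibonacci numeros (calcular_fibonacci numeros)

-- ===== LEMMAS AND PROOFS =====

def fibZ : Nat → Int
  | 0 => 0
  | 1 => 1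
  | n + 2 => fibZ (n + 1) + fibZ n

theorem pair_iter (l : List Int) : ∀ (k : Nat),
    l.foldl (fun (p : Int × Int) _ => (p.2, p.1 + p.2)) (fibZ k, fibZ (k + 1))
      = (fibZ (k + l.length), fibZ (k + l.length + 1)) := by
  induction l with
  | nil => intro k; simp
  | cons a l ih =>
      intro k
      simp only [List.foldl_cons, List.length_cons]
      have h2 : (fibZ (k + 1), fibZ k + fibZ (k + 1)) = (fibZ (k + 1), fibZ ((k + 1) + 1)) := by
        have hd : fibZ (k + 2) = fibZ (k + 1) + fibZ k := rfl
        rw [show (k + 1) + 1 = k + 2 from rfl, hd]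
        rw [Int.add_comm]
      rw [h2, ih (k + 1), show k + 1 + l.length = k + (l.length + 1) by omega]

-- A's per-element loop computes fibZ
theorem elemA_eq (num : Int) (h : 2 ≤ num) :
    ((PySem.List.pyRange 0 (num - 1) 1).foldl
        (fun (p : Int × Int) _ => (p.2, p.1 + p.2)) (0, 1)).2 = fibZ num.toNat := by
  have h0 : ((0 : Int), (1 : Int)) = (fibZ 0, fibZ 1) := rfl
  have hl : (PySem.List.pyRange 0 (num - 1) 1).length = (num - 1 - 0).toNat :=
    PySem.List.length_pyRange_one 0 (num - 1)
  rw [h0, pair_iter, hl]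
  show fibZ (0 + (num - 1 - 0).toNat + 1) = fibZ num.toNat
  congr 1
  omega

-- B's table equals the map of fibZ over an initial range
theorem table_eq (t : Nat) :
    (PySem.List.pyRange 2 (2 + (t : Int)) 1).foldl
      (fun (fib : List Int) (i : Int) => fib ++ [PySem.List.pyGetD fib (i - 1) 0 + PySem.List.pyGetD fib (i - 2) 0])
      [0, 1]
      = (List.range (2 + t)).map fibZ := by
  induction t with
  | zero =>
      rw [PySem.List.pyRange_one_eq_nil (by omega)]
      simp [List.range_succ]
      exact ⟨rfl, rfl⟩
  | succ t ih =>
      have hsplit : PySem.List.pyRange 2 (2 + ((t : Int) + 1)) 1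
          = PySem.List.pyRange 2 (2 + (t : Int)) 1 ++ [2 + (t : Int)] := by
        have := PySem.List.pyRange_one_succ_right (a := 2) (b := 2 + (t : Int)) (by omega)
        rw [show (2 : Int) + ((t : Int) + 1) = 2 + (t : Int) + 1 by ring]
        exact this
      rw [show ((t + 1 : Nat) : Int) = (t : Int) + 1 by push_cast; ring, hsplit,
        List.foldl_append, ih]
      simp only [List.foldl_cons, List.foldl_nil]
      have hg1 : PySem.List.pyGetD ((List.range (2 + t)).map fibZ) (2 + (t : Int) - 1) 0
          = fibZ (1 + t) := by
        rw [PySem.List.pyGetD_eq_getElem _ 0 (by omega)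
          (by simp only [List.length_map, List.length_range]; push_cast; omega)]
        simp only [List.getElem_map, List.getElem_range]
        congr 1
        omega
      have hg2 : PySem.List.pyGetD ((List.range (2 + t)).map fibZ) (2 + (t : Int) - 2) 0
          = fibZ t := by
        rw [PySem.List.pyGetD_eq_getElem _ 0 (by omega)
          (by simp only [List.length_map, List.length_range]; push_cast; omega)]
        simp only [List.getElem_map, List.getElem_range]
        congr 1
        omega
      rw [hg1, hg2]
      rw [show 2 + (t + 1) = (2 + t) + 1 by ring, List.range_succ]
      simp only [List.map_append, List.map_cons, List.map_nil]
      congr 2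
      rw [show 2 + t = t + 2 by omega, show 1 + t = t + 1 by omega]
      rfl

-- folding append-singleton over a list is a map
theorem foldl_app (g : Int → Int) (l : List Int) : ∀ acc,
    l.foldl (fun x num => x ++ [g num]) acc = acc ++ l.map g := by
  induction l with
  | nil => simp
  | cons a l ih => intro acc; simp [ih]

-- ===== VERDICT (by name: the statement is the Claim_ definition above) =====
theorem calcular_fibonacci_spec : Claim_equal_calcular_fibonacci := by
  intro numeros _
  show calcular_fibonacci numeros = calcular_fibonacci_alt numeros
  unfold calcular_fibonacci calcular_fibonacci_alt
  set m := (PySem.List.max? numeros (fun x => x)).getD 1 with hm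
  set fib := (PySem.List.pyRange 2 (m + 1) 1).foldl
    (fun (fib : List Int) (i : Int) => fib ++ [PySem.List.pyGetD fib (i - 1) 0 + PySem.List.pyGetD fib (i - 2) 0])
    [0, 1] with hfib
  have hstep : (fun (x : List Int) (num : Int) =>
      if num == 0 then x ++ [0]
      else if num == 1 then x ++ [1]
      else
        let p := (PySem.List.pyRange 0 (num - 1) 1).foldl
          (fun (p : Int × Int) _ => (p.2, p.1 + p.2)) (0, 1)
        x ++ [p.2])
      = (fun x num => x ++ [if num == 0 then 0 else if num == 1 then 1 else
          ((PySem.List.pyRange 0 (num - 1) 1).foldl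
            (fun (p : Int × Int) _ => (p.2, p.1 + p.2)) (0, 1)).2]) := by
    funext x num
    by_cases h0 : num = 0 <;> by_cases h1 : num = 1 <;> simp [h0, h1]
  rw [hstep, foldl_app]
  simp only [List.nil_append]
  apply List.map_congr_left
  intro n hn
  by_cases h0 : n = 0
  · simp [h0]
  by_cases hlt : n < 2
  · have h1 : ¬ (2 : Int) ≤ n := by omega
    by_cases hn1 : n = 1
    · simp [hn1]
    · rw [PySem.List.pyRange_one_eq_nil (show n - 1 ≤ 0 by omega)]
      simp [h0, hn1, hlt]
  · have h1 : n ≠ 1 := by omega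
    simp only [beq_iff_eq, h0, h1, hlt, if_false]
    rw [elemA_eq n (by omega)]
    have hnm : n ≤ m := by
      rcases hmax : PySem.List.max? numeros (fun x => x) with _ | v
      · have hnil : numeros = [] := (PySem.List.max?_eq_none_iff numeros _).mp hmax
        subst hnil; cases hn
      · have := PySem.List.max?_isMax hmax n hn
        simp only [hm, hmax, Option.getD_some]
        exact this
    have ht : fib = (List.range (2 + (m - 1).toNat)).map fibZ := by
      rw [hfib, show m + 1 = 2 + ((m - 1).toNat : Int) by omega]
      exact table_eq (m - 1).toNat
    rw [← hfib, ht, PySem.List.pyGetD_eq_getElem _ 0 (by omega)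
      (by simp only [List.length_map, List.length_range]; push_cast; omega)]
    simp
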